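-- pv_equiv track=rewrite | github.com/cirosantilli/project-euler-solvers | solvers/495.py | factorial_prime_exponent_frequencies
-- ===== SOURCE A (Python) =====
-- import math
--
-- def sieve_primes_upto(n: int) -> list[int]:
--     """Simple bytearray sieve."""
--     if n < 2:
--         return []
--     bs = bytearray(b"\x01") * (n + 1)
--     bs[0:2] = b"\x00\x00"
--     lim = int(math.isqrt(n))
--     for i in range(2, lim + 1):
--         if bs[i]:
--             step = i
--             start = i * i
--             bs[start : n + 1 : step] = b"\x00" * (((n - start) // step) + 1)
--     return [i for i in range(n + 1) if bs[i]]
--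
-- def factorial_prime_exponent_frequencies(n: int) -> dict[int, int]:
--     """
--     Returns a map exponent -> how many primes p have v_p(n!) == exponent.
--     Uses Legendre's formula: v_p(n!) = sum_{t>=1} floor(n/p^t).
--     """
--     primes = sieve_primes_upto(n)
--     freq: dict[int, int] = {}
--     for p in primes:
--         e = 0
--         nn = n
--         while nn:
--             nn //= p
--             e += nn
--         freq[e] = freq.get(e, 0) + 1
--     return freq
-- ===== SOURCE B (Python) =====
-- import math
--
-- def factorial_prime_exponent_frequencies(n: int) -> dict[int, int]:
--     """
--     Returns a map exponent -> how many primes p have v_p(n!) == exponent.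
--     Single pass over 2..n: primality by trial division up to isqrt(p),
--     exponent by Legendre's closed form v_p(n!) = (n - s_p(n)) / (p - 1),
--     where s_p(n) is the digit sum of n written in base p.
--     """
--     freq: dict[int, int] = {}
--     for p in range(2, n + 1):
--         if all(p % d for d in range(2, math.isqrt(p) + 1)):
--             s = 0
--             nn = n
--             while nn:
--                 s += nn % p
--                 nn //= p
--             freq[(n - s) // (p - 1)] = freq.get((n - s) // (p - 1), 0) + 1
--     return freq
-- ===== Notes on version B (the rewrite author's own statement) =====
-- stated objective: simpler
-- what changed: B drops the sieve entirely: one pass over 2..n testing each p by trial division up to isqrt(p), and computes the exponent by Legendre's closed form (n - s_p(n)) / (p - 1) from the base-p digit sum instead of summing the successive quotients n//p + n//p^2 + ...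
import Mathlib
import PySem

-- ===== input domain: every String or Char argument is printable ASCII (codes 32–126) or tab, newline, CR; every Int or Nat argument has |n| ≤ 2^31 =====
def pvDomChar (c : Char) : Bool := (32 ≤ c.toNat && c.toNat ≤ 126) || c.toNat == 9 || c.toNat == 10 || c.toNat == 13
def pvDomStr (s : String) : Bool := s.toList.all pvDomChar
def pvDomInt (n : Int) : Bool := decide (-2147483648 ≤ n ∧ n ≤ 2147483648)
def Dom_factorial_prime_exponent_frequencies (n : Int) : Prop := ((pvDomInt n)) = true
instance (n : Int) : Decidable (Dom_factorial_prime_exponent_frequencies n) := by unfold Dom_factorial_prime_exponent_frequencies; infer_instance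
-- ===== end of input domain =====

-- B drops A's sieve: one pass over 2..n with trial division up to isqrt(p) for primality,
-- and Legendre's closed form (n - s_p(n)) / (p - 1) from the base-p digit sum instead of
-- A's successive-quotient summation (objective: simpler — B is shorter and helper-free; not faster).

-- ===== PORT A =====
-- the bounded quotient fact the inner loops' termination cites
lemma pvEdivLt (a b : Int) (h1 : 0 < a) (h2 : 2 ≤ b) : a / b < a := by
  have h3 : 0 ≤ a / b := Int.ediv_nonneg (by omega) (by omega)
  have h4 : a / b * b ≤ a := Int.ediv_mul_le a (by omega)
  nlinarith

-- bytearray slice assignment bs[start : n+1 : step] = zeros, done element by element with the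
-- same count ((n - start) // step) + 1 that the Python slice writes
def pvMarkN : Nat → List Bool → Nat → Nat → List Bool
  | 0, bs, _, _ => bs
  | k + 1, bs, idx, step => pvMarkN k (bs.set idx false) (idx + step) step

-- sieve_primes_upto, A's module helper; math.isqrt ported as Nat.sqrt
def pvSieve (n : Int) : List Int :=
  if n < 2 then []
  else
    let N := n.toNat
    let bs0 := ((List.replicate (N + 1) true).set 0 false).set 1 false
    let lim := Nat.sqrt N
    let bs := (List.range' 2 (lim - 1)).foldl
      (fun bs i =>
        if bs.getD i false then pvMarkN ((N - i * i) / i + 1) bs (i * i) i else bs) bs0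
    ((List.range (N + 1)).filter (fun i => bs.getD i false)).map (fun i => Int.ofNat i)

-- A's inner loop: while nn: nn //= p; e += nn  (the 0 < nn ∧ 2 ≤ p guard only makes the
-- recursion total; in A, nn starts at n ≥ 2 > 0 and p is a prime ≥ 2, so it is 'while nn')
def pvLegLoop (p nn e : Int) : Int :=
  if h : 0 < nn ∧ 2 ≤ p then
    pvLegLoop p (PySem.Int.floordiv nn p) (e + PySem.Int.floordiv nn p)
  else e
termination_by nn.toNat
decreasing_by
  have h1 : PySem.Int.floordiv nn p = nn / p := PySem.Int.floordiv_eq_ediv_of_pos (by omega)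
  have h2 : nn / p < nn := pvEdivLt nn p h.1 (by omega)
  have h3 : 0 ≤ nn / p := Int.ediv_nonneg (le_of_lt h.1) (by omega)
  simp [h1]; omega

def factorial_prime_exponent_frequencies (n : Int) : List (Int × Int) :=
  let primes := pvSieve n
  let freq := primes.foldl
    (fun freq p =>
      let e := pvLegLoop p n 0
      freq.insert e (freq.getD e 0 + 1))
    (PySem.Dict.empty)
  freq.items

-- ===== PORT B =====
-- all(p % d for d in range(2, math.isqrt(p) + 1))
def pvIsPrime (p : Int) : Bool :=
  (List.range' 2 (Nat.sqrt p.toNat - 1)).all (fun d => !(PySem.Int.mod p (d : Int) == 0))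

-- B's inner loop: while nn: s += nn % p; nn //= p  — written as a plain recursion on nn
-- (same totality guard; in B, nn starts at n > 0 and p ≥ 2)
def pvDigitSum (p nn : Int) : Int :=
  if h : 0 < nn ∧ 2 ≤ p then
    PySem.Int.mod nn p + pvDigitSum p (PySem.Int.floordiv nn p)
  else 0
termination_by nn.toNat
decreasing_by
  have h1 : PySem.Int.floordiv nn p = nn / p := PySem.Int.floordiv_eq_ediv_of_pos (by omega)
  have h2 : nn / p < nn := pvEdivLt nn p h.1 (by omega)
  have h3 : 0 ≤ nn / p := Int.ediv_nonneg (le_of_lt h.1) (by omega)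
  simp [h1]; omega

def factorial_prime_exponent_frequencies_alt (n : Int) : List (Int × Int) :=
  ((List.range' 2 (n - 1).toNat).foldl
    (fun freq (j : Nat) =>
      let p : Int := (j : Int)
      if pvIsPrime p then
        freq.insert (PySem.Int.floordiv (n - pvDigitSum p n) (p - 1))
          (freq.getD (PySem.Int.floordiv (n - pvDigitSum p n) (p - 1)) 0 + 1)
      else freq)
    PySem.Dict.empty).items

-- ===== PRECONDITION & SPEC =====
def Spec_factorial_prime_exponent_frequencies (n : Int) (out : List (Int × Int)) : Prop := out = factorial_prime_exponent_frequencies_alt n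
instance (n : Int) (out : List (Int × Int)) : Decidable (Spec_factorial_prime_exponent_frequencies n out) := by unfold Spec_factorial_prime_exponent_frequencies; infer_instance

-- ===== CLAIM (what is proved, stated in full; the proofs are below) =====
def Claim_equal_factorial_prime_exponent_frequencies : Prop := ∀ (n : Int), Dom_factorial_prime_exponent_frequencies n → Spec_factorial_prime_exponent_frequencies n (factorial_prime_exponent_frequencies n)

-- ===== LEMMAS AND PROOFS =====

-- "j has no divisor d with d*d ≤ j": what both prime tests decide
def pvNoSmallDiv (j : Nat) : Prop := ∀ d : Nat, 2 ≤ d → d * d ≤ j → ¬ d ∣ j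

lemma pvMarkN_length (k : Nat) : ∀ (bs : List Bool) (idx step : Nat),
    (pvMarkN k bs idx step).length = bs.length := by
  induction k with
  | zero => intro bs idx step; rfl
  | succ k ih => intro bs idx step; simp [pvMarkN, ih]

lemma set_getD_false_iff (bs : List Bool) (idx j : Nat) :
    ((bs.set idx false).getD j false = false ↔
      bs.getD j false = false ∨ (j = idx ∧ j < bs.length)) := by
  by_cases hl : j < bs.length
  · simp only [List.getD, List.getElem?_set]
    by_cases he : idx = j
    · subst he
      simp [hl]
    · simp [he, Ne.symm he]
  · have hl2 : bs.length ≤ j := by omega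
    simp [List.getD, hl2, List.length_set]

lemma pvMarkN_getD_false_iff (k : Nat) : ∀ (bs : List Bool) (idx step j : Nat),
    ((pvMarkN k bs idx step).getD j false = false ↔
      bs.getD j false = false ∨ ∃ t, t < k ∧ j = idx + t * step ∧ j < bs.length) := by
  induction k with
  | zero => intro bs idx step j; simp [pvMarkN]
  | succ k ih =>
    intro bs idx step j
    rw [pvMarkN, ih, set_getD_false_iff]
    simp only [List.length_set]
    constructor
    · rintro ((h | ⟨he, hl⟩) | ⟨t, ht, hj, hl⟩)
      · exact Or.inl h
      · exact Or.inr ⟨0, by omega, by omega, hl⟩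
      · exact Or.inr ⟨t + 1, by omega, by rw [hj]; ring, hl⟩
    · rintro (h | ⟨t, ht, hj, hl⟩)
      · exact Or.inl (Or.inl h)
      · match t with
        | 0 => exact Or.inl (Or.inr ⟨by omega, hl⟩)
        | t + 1 => exact Or.inr ⟨t, by omega, by rw [hj]; ring, hl⟩

lemma pvBs0_getD (N j : Nat) (h2 : 2 ≤ N) (hj : j ≤ N) :
    ((((List.replicate (N + 1) true).set 0 false).set 1 false).getD j false = false ↔ j < 2) := by
  match j, hj with
  | 0, _ => simp [List.getD, List.getElem?_set, List.getElem?_replicate]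
  | 1, _ => simp [List.getD, List.getElem?_set, List.getElem?_replicate, show 0 < N by omega]
  | j + 2, hj => simp [List.getD, List.getElem?_set, List.getElem?_replicate, hj]

lemma pvSieveFold_inv (N : Nat) (hN : 2 ≤ N) : ∀ (c start : Nat) (bs : List Bool),
    2 ≤ start → start + c ≤ Nat.sqrt N + 1 → bs.length = N + 1 →
    (∀ j, j ≤ N → (bs.getD j false = false ↔
        j < 2 ∨ ∃ d, 2 ≤ d ∧ d < start ∧ d * d ≤ j ∧ d ∣ j)) →
    ∀ j, j ≤ N →
      (((List.range' start c).foldl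
          (fun bs i =>
            if bs.getD i false then pvMarkN ((N - i * i) / i + 1) bs (i * i) i else bs)
          bs).getD j false = false ↔
        j < 2 ∨ ∃ d, 2 ≤ d ∧ d < start + c ∧ d * d ≤ j ∧ d ∣ j) := by
  intro c
  induction c with
  | zero => intro start bs h2 hb hlen hinv j hj; simpa using hinv j hj
  | succ c ih =>
    intro start bs h2 hb hlen hinv j hj
    have hsle : start ≤ Nat.sqrt N := by omega
    have hsN : start ≤ N := le_trans hsle (Nat.sqrt_le_self N)
    have hs2N : start * start ≤ N := le_trans (Nat.mul_le_mul hsle hsle) (Nat.sqrt_le N)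
    rw [List.range'_succ, List.foldl_cons]
    set bs' := (if bs.getD start false = true
        then pvMarkN ((N - start * start) / start + 1) bs (start * start) start else bs) with hbs'
    have hlen' : bs'.length = N + 1 := by
      rw [hbs']; split
      · rw [pvMarkN_length]; exact hlen
      · exact hlen
    have hinv' : ∀ j, j ≤ N → (bs'.getD j false = false ↔
        j < 2 ∨ ∃ d, 2 ≤ d ∧ d < start + 1 ∧ d * d ≤ j ∧ d ∣ j) := by
      intro j hj
      rw [hbs']
      by_cases hget : bs.getD start false = true
      · -- start survived: mark its multiples from start*start
        simp only [hget, if_true]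
        rw [pvMarkN_getD_false_iff, hinv j hj, hlen]
        constructor
        · rintro ((hlt | ⟨d, hd⟩) | ⟨t, ht, hjt, _⟩)
          · exact Or.inl hlt
          · exact Or.inr ⟨d, hd.1, by omega, hd.2.2⟩
          · refine Or.inr ⟨start, h2, by omega, ?_, ⟨start + t, by rw [hjt]; ring⟩⟩
            rw [hjt]; exact Nat.le_add_right _ _
        · rintro (hlt | ⟨d, hd2, hdlt, hdd, hddvd⟩)
          · exact Or.inl (Or.inl hlt)
          · by_cases hdstart : d < start
            · exact Or.inl (Or.inr ⟨d, hd2, hdstart, hdd, hddvd⟩)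
            · -- d = start
              have hds : d = start := by omega
              subst hds
              obtain ⟨q, hq⟩ := hddvd
              have hqge : d ≤ q := by
                by_contra hqlt
                push_neg at hqlt
                have hlt : d * q < d * d := (Nat.mul_lt_mul_left (by omega)).mpr hqlt
                exact absurd hdd (not_le.mpr (hq ▸ hlt))
              refine Or.inr ⟨q - d, ?_, ?_, by omega⟩
              · have h1 : (q - d) * d ≤ N - d * d := by
                  rw [Nat.sub_mul]
                  have : q * d ≤ N := by rw [Nat.mul_comm] at hq; omega
                  omega
                have := (Nat.le_div_iff_mul_le (by omega : 0 < d)).mpr h1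
                omega
              · rw [Nat.mul_comm] at hq
                rw [hq, Nat.sub_mul]
                have hdd2 : d * d ≤ q * d := Nat.mul_le_mul_right d hqge
                omega
      · -- start already marked: it is composite, its multiples are already covered
        rw [if_neg hget]
        rw [hinv j hj]
        have hstartdead := (hinv start hsN).mpr
        have hcomp : ∃ d, 2 ≤ d ∧ d < start ∧ d * d ≤ start ∧ d ∣ start := by
          have := (hinv start hsN).mp (by
            cases hg : bs.getD start false
            · rfl
            · exact absurd hg hget)
          rcases this with h | h
          · omega
          · exact h
        constructor
        · rintro (hlt | ⟨d, hd⟩)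
          · exact Or.inl hlt
          · exact Or.inr ⟨d, hd.1, by omega, hd.2.2⟩
        · rintro (hlt | ⟨d, hd2, hdlt, hdd, hddvd⟩)
          · exact Or.inl hlt
          · by_cases hdstart : d < start
            · exact Or.inr ⟨d, hd2, hdstart, hdd, hddvd⟩
            · have hds : d = start := by omega
              subst hds
              obtain ⟨d0, hd02, hd0lt, hd0dd, hd0dvd⟩ := hcomp
              refine Or.inr ⟨d0, hd02, by omega, ?_, dvd_trans hd0dvd hddvd⟩
              have hdle : d ≤ d * d := Nat.le_mul_of_pos_left d (by omega)
              omega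
    have := ih (start + 1) bs' (by omega) (by omega) hlen' hinv' j hj
    rw [show start + (c + 1) = start + 1 + c by omega]
    exact this

lemma pvIsPrime_iff (j : Nat) (h2 : 2 ≤ j) :
    (pvIsPrime (j : Int) = true ↔ pvNoSmallDiv j) := by
  have hs1 : 1 ≤ Nat.sqrt j := (Nat.le_sqrt).mpr (by omega)
  unfold pvIsPrime pvNoSmallDiv
  rw [List.all_eq_true]
  simp only [Int.toNat_natCast, List.mem_range', Bool.not_eq_eq_eq_not, Bool.not_true,
    beq_eq_false_iff_ne, ne_eq]
  constructor
  · intro h d hd2 hdd hdvd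
    have hds : d ≤ Nat.sqrt j := (Nat.le_sqrt).mpr hdd
    have := h d ⟨d - 2, by omega, by omega⟩
    exact this ((PySem.Int.mod_eq_zero_iff_dvd _ _).mpr (Int.natCast_dvd_natCast.mpr hdvd))
  · rintro h d ⟨i, hi, rfl⟩
    intro hmod
    have hdvd : 2 + 1 * i ∣ j := Int.natCast_dvd_natCast.mp ((PySem.Int.mod_eq_zero_iff_dvd _ _).mp hmod)
    have hds : 2 + 1 * i ≤ Nat.sqrt j := by omega
    exact h (2 + 1 * i) (by omega) (le_trans (Nat.mul_le_mul hds hds) (Nat.sqrt_le j)) hdvd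

lemma pvSieve_eq (n : Int) :
    pvSieve n = ((List.range' 2 (n - 1).toNat).filter (fun j : Nat => pvIsPrime (j : Int))).map
      (fun j : Nat => (j : Int)) := by
  by_cases hn : n < 2
  · simp [pvSieve, hn, show (n - 1).toNat = 0 by omega]
  · have hN : 2 ≤ n.toNat := by omega
    set N := n.toNat with hNdef
    have hs1 : 1 ≤ Nat.sqrt N := Nat.le_sqrt.mpr (by omega)
    unfold pvSieve
    rw [if_neg hn]
    dsimp only
    set bsF := (List.range' 2 (Nat.sqrt N - 1)).foldl
      (fun bs i =>
        if bs.getD i false then pvMarkN ((N - i * i) / i + 1) bs (i * i) i else bs)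
      (((List.replicate (N + 1) true).set 0 false).set 1 false) with hbsF
    have hchar : ∀ j, j ≤ N → (bsF.getD j false = false ↔
        j < 2 ∨ ∃ d, 2 ≤ d ∧ d < 2 + (Nat.sqrt N - 1) ∧ d * d ≤ j ∧ d ∣ j) := by
      intro j hj
      exact pvSieveFold_inv N hN (Nat.sqrt N - 1) 2
        (((List.replicate (N + 1) true).set 0 false).set 1 false)
        (le_refl 2) (by omega)
        (by simp)
        (fun j hj => by
          rw [pvBs0_getD N j hN hj]
          constructor
          · exact Or.inl
          · rintro (h | ⟨d, hd⟩)
            · exact h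
            · omega)
        j hj
    have hpred : ∀ j ∈ List.range' 2 (N - 1),
        bsF.getD j false = pvIsPrime (j : Int) := by
      intro j hjmem
      obtain ⟨i, hi, hji⟩ := List.mem_range'.mp hjmem
      have hj2 : 2 ≤ j := by omega
      have hjN : j ≤ N := by omega
      have hiff : (bsF.getD j false = true ↔ pvIsPrime (j : Int) = true) := by
        rw [pvIsPrime_iff j hj2]
        constructor
        · intro ht d hd2 hdd hdvd
          have hds : d ≤ Nat.sqrt N := Nat.le_sqrt.mpr (le_trans hdd hjN)
          have := (hchar j hjN).mpr (Or.inr ⟨d, hd2, by omega, hdd, hdvd⟩)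
          rw [this] at ht
          exact Bool.false_ne_true ht
        · intro hnsd
          cases hg : bsF.getD j false
          · rcases (hchar j hjN).mp hg with h | ⟨d, hd2, _, hdd, hdvd⟩
            · omega
            · exact absurd hdvd (hnsd d hd2 hdd)
          · rfl
      cases h1 : bsF.getD j false <;> cases h2 : pvIsPrime (j : Int) <;>
        rw [h1, h2] at hiff <;> simp_all
    have hrange : List.range (N + 1) = List.range' 0 2 ++ List.range' 2 (N - 1) := by
      rw [List.range_eq_range', List.range'_append_1]
      congr 1
      omega
    rw [hrange, List.filter_append]
    have h01 : (List.range' 0 2).filter (fun i => bsF.getD i false) = [] := by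
      have hg0 : bsF.getD 0 false = false := (hchar 0 (by omega)).mpr (Or.inl (by omega))
      have hg1 : bsF.getD 1 false = false := (hchar 1 (by omega)).mpr (Or.inl (by omega))
      show List.filter _ [0, 1] = []
      simp [List.filter, show bsF[0]?.getD false = false from hg0,
        show bsF[1]?.getD false = false from hg1]
    rw [h01, List.nil_append, List.filter_congr hpred,
        show (n - 1).toNat = N - 1 by omega]
    rfl


-- accumulator shift for A's loop
lemma pvLegLoop_shift (p : Int) : ∀ (m : Nat) (nn e : Int), nn.toNat = m →
    pvLegLoop p nn e = e + pvLegLoop p nn 0 := by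
  intro m
  induction m using Nat.strong_induction_on with
  | _ m ih =>
    intro nn e hm
    rw [pvLegLoop]
    conv_rhs => rw [pvLegLoop]
    split_ifs with h
    · have hq : PySem.Int.floordiv nn p = nn / p := PySem.Int.floordiv_eq_ediv_of_pos (by omega)
      have h2 : nn / p < nn := pvEdivLt nn p h.1 (by omega)
      have hlt : (PySem.Int.floordiv nn p).toNat < m := by rw [hq]; omega
      rw [ih _ hlt _ (e + PySem.Int.floordiv nn p) rfl,
          ih _ hlt _ (0 + PySem.Int.floordiv nn p) rfl]
      ring
    · ring

-- Legendre's identity: (p-1) * Σ_t floor(nn/p^t) = nn - digitsum_p(nn)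
lemma pvLegendre_key (p : Int) (hp : 2 ≤ p) : ∀ (m : Nat) (nn : Int), nn.toNat = m → 0 ≤ nn →
    (p - 1) * pvLegLoop p nn 0 = nn - pvDigitSum p nn := by
  intro m
  induction m using Nat.strong_induction_on with
  | _ m ih =>
    intro nn hm hnn
    rw [pvLegLoop, pvDigitSum]
    split_ifs with h
    · have hq : PySem.Int.floordiv nn p = nn / p := PySem.Int.floordiv_eq_ediv_of_pos (by omega)
      have h2 : nn / p < nn := pvEdivLt nn p h.1 (by omega)
      have h3 : 0 ≤ nn / p := Int.ediv_nonneg (by omega) (by omega)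
      have hlt : (PySem.Int.floordiv nn p).toNat < m := by rw [hq]; omega
      rw [pvLegLoop_shift p _ _ _ rfl]
      have hIH := ih _ hlt _ rfl (by rw [hq]; exact h3)
      linear_combination hIH + PySem.Int.floordiv_mul_add_mod nn p
    · have hz : nn = 0 := by omega
      simp [hz]

lemma pvFloordiv_cancel (p e : Int) (hp : 2 ≤ p) :
    PySem.Int.floordiv ((p - 1) * e) (p - 1) = e := by
  rw [PySem.Int.floordiv_eq_ediv_of_pos (by omega)]
  exact Int.mul_ediv_cancel_left e (by omega)

lemma pvExp_eq (n p : Int) (hp : 2 ≤ p) (hn : 0 ≤ n) :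
    PySem.Int.floordiv (n - pvDigitSum p n) (p - 1) = pvLegLoop p n 0 := by
  have hkey := pvLegendre_key p hp n.toNat n rfl hn
  rw [← hkey]
  exact pvFloordiv_cancel p _ hp

-- ===== VERDICT (by name: the statement is the Claim_ definition above) =====
theorem factorial_prime_exponent_frequencies_spec : Claim_equal_factorial_prime_exponent_frequencies := by
  intro n _
  unfold Spec_factorial_prime_exponent_frequencies
  unfold factorial_prime_exponent_frequencies factorial_prime_exponent_frequencies_alt
  dsimp only
  rw [pvSieve_eq n, List.foldl_map,
      PySem.List.foldl_if_eq_foldl_filter (fun j : Nat => pvIsPrime (j : Int))]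
  refine congrArg PySem.Dict.items (PySem.List.foldl_congr_mem _ _ _ PySem.Dict.empty ?_)
  intro freq j hj
  obtain ⟨i, hi, hji⟩ := List.mem_range'.mp (List.mem_of_mem_filter hj)
  have hj2 : 2 ≤ j ∧ j ≤ (n - 1).toNat + 1 := by omega
  have hn : 2 ≤ n := by
    have : (n - 1).toNat ≠ 0 := by omega
    omega
  rw [pvExp_eq n (j : Int) (by exact_mod_cast hj2.1) (by omega)]
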